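-- pv_equiv track=rewrite | github.com/zhushen12580/StyleSwift | app.py | format_css_properties
-- ===== SOURCE A (Python) =====
-- def format_css_properties(css_text):
--     """格式化CSS属性，每个属性一行，增加缩进"""
--     # 清理输入
--     css_text = css_text.strip()
--
--     # 移除可能的花括号
--     if css_text.startswith('{'):
--         css_text = css_text[1:]
--     if css_text.endswith('}'):
--         css_text = css_text[:-1]
--
--     # 分割各属性并添加缩进
--     properties = []
--     for line in css_text.split(';'):
--         line = line.strip()
--         if line and ':' in line:
--             properties.append(f"    {line};")
--
--     # 按属性类型分组并排序
--     layout_props = []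
--     visual_props = []
--     text_props = []
--     other_props = []
--
--     for prop in properties:
--         prop_name = prop.split(':')[0].strip()
--         if prop_name in ['display', 'position', 'width', 'height', 'margin', 'padding',
--                         'top', 'right', 'bottom', 'left', 'float', 'clear']:
--             layout_props.append(prop)
--         elif prop_name in ['background', 'background-color', 'border', 'border-radius',
--                           'box-shadow', 'opacity', 'color']:
--             visual_props.append(prop)
--         elif prop_name in ['font', 'font-size', 'font-family', 'font-weight', 'text-align',
--                           'line-height', 'letter-spacing']:
--             text_props.append(prop)
--         else:
--             other_props.append(prop)
--
--     # 组合所有属性，添加组间空行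
--     formatted = []
--
--     if layout_props:
--         formatted.extend(layout_props)
--         if visual_props or text_props or other_props:
--             formatted.append("")
--
--     if visual_props:
--         formatted.extend(visual_props)
--         if text_props or other_props:
--             formatted.append("")
--
--     if text_props:
--         formatted.extend(text_props)
--         if other_props:
--             formatted.append("")
--
--     if other_props:
--         formatted.extend(other_props)
--
--     return "\n".join(formatted)
-- ===== SOURCE B (Python) =====
-- _GROUPS = (
--     ['display', 'position', 'width', 'height', 'margin', 'padding',
--      'top', 'right', 'bottom', 'left', 'float', 'clear'],
--     ['background', 'background-color', 'border', 'border-radius',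
--      'box-shadow', 'opacity', 'color'],
--     ['font', 'font-size', 'font-family', 'font-weight', 'text-align',
--      'line-height', 'letter-spacing'],
-- )
--
--
-- def _category(name):
--     for idx, names in enumerate(_GROUPS):
--         if name in names:
--             return idx
--     return len(_GROUPS)
--
--
-- def format_css_properties(css_text):
--     """格式化CSS属性，每个属性一行，增加缩进"""
--     text = css_text.strip()
--     if text.startswith('{'):
--         text = text[1:]
--     if text.endswith('}'):
--         text = text[:-1]
--
--     # decorate each formatted property with its category index
--     decorated = []
--     for raw in text.split(';'):
--         line = raw.strip()
--         if line and ':' in line: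
--             prop = f"    {line};"
--             decorated.append((_category(prop.split(':')[0].strip()), prop))
--
--     # stable sort brings the categories together, keeping source order inside each
--     decorated.sort(key=lambda t: t[0])
--
--     # single scan: a blank line whenever the category changes
--     out = []
--     prev = None
--     for cat, prop in decorated:
--         if prev is not None and prev != cat:
--             out.append("")
--         out.append(prop)
--         prev = cat
--     return "\n".join(out)
-- ===== Notes on version B (the rewrite author's own statement) =====
-- stated objective: alternative
-- what changed: Replaces A's four-bucket if/elif classification plus a four-if assembly cascade with blank-line lookahead by a decorate-stable-sort-scan pipeline: each property is tagged with a category index found by one loop over a tuple of name lists, the list is stably sorted by that index, and a single scan emits a blank line whenever the category index changes.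
import Mathlib
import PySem

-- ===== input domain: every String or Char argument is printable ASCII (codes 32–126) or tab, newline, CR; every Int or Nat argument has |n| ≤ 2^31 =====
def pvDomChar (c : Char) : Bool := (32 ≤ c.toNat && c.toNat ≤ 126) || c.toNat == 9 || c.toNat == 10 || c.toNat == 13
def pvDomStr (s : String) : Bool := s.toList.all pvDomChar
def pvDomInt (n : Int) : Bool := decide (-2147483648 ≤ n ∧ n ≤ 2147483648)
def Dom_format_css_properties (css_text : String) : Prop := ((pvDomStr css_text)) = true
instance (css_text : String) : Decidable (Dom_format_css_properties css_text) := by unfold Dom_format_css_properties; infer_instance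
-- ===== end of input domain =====

-- B replaces A's four-bucket if/elif classification and four-if blank-line-lookahead
-- assembly by decorate–stable-sort–scan (tag with a category index, sort stably by it,
-- emit a blank line on each index change); objective: alternative, same observable value.

-- ===== PORT A =====
-- shared helpers: these lines of Python are identical in A and in B
def pvClean (cs : List Char) : List Char :=
  let t0 := PySem.Chars.strip cs
  let t1 := if PySem.Chars.startswith t0 ['{'] then PySem.Chars.slice t0 (some 1) none else t0
  if PySem.Chars.endswith t1 ['}'] then PySem.Chars.slice t1 none (some (-1)) else t1

def pvOk (line : List Char) : Bool :=
  !(PySem.Chars.strip line).isEmpty && PySem.Chars.isIn [':'] (PySem.Chars.strip line)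

def pvPad (line : List Char) : List Char :=
  "    ".toList ++ PySem.Chars.strip line ++ [';']

def pvNameOf (p : List Char) : List Char :=
  PySem.Chars.strip (PySem.List.pyGetD (PySem.Chars.splitOn p [':']) 0 [])

def pvLayoutNames : List (List Char) :=
  ["display", "position", "width", "height", "margin", "padding",
   "top", "right", "bottom", "left", "float", "clear"].map String.toList

def pvVisualNames : List (List Char) :=
  ["background", "background-color", "border", "border-radius",
   "box-shadow", "opacity", "color"].map String.toList

def pvTextNames : List (List Char) :=
  ["font", "font-size", "font-family", "font-weight", "text-align",
   "line-height", "letter-spacing"].map String.toList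

def format_css_properties (css_text : String) : String :=
  let properties := (PySem.Chars.splitOn (pvClean css_text.toList) [';']).foldl
      (fun acc line => if pvOk line then acc ++ [pvPad line] else acc) []
  let g := properties.foldl
      (fun (g : List (List Char) × List (List Char) × List (List Char) × List (List Char)) prop =>
        if pvLayoutNames.contains (pvNameOf prop) then (g.1 ++ [prop], g.2.1, g.2.2.1, g.2.2.2)
        else if pvVisualNames.contains (pvNameOf prop) then (g.1, g.2.1 ++ [prop], g.2.2.1, g.2.2.2)
        else if pvTextNames.contains (pvNameOf prop) then (g.1, g.2.1, g.2.2.1 ++ [prop], g.2.2.2)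
        else (g.1, g.2.1, g.2.2.1, g.2.2.2 ++ [prop]))
      ([], [], [], [])
  let formatted :=
    (if !g.1.isEmpty then
       g.1 ++ (if !g.2.1.isEmpty || !g.2.2.1.isEmpty || !g.2.2.2.isEmpty then [([] : List Char)] else [])
     else [])
    ++ (if !g.2.1.isEmpty then
          g.2.1 ++ (if !g.2.2.1.isEmpty || !g.2.2.2.isEmpty then [([] : List Char)] else [])
        else [])
    ++ (if !g.2.2.1.isEmpty then
          g.2.2.1 ++ (if !g.2.2.2.isEmpty then [([] : List Char)] else [])
        else [])
    ++ (if !g.2.2.2.isEmpty then g.2.2.2 else [])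
  String.mk (PySem.Chars.join ['\n'] formatted)

-- ===== PORT B =====
-- Source B's _GROUPS tuple
def pvGroupsB : List (List (List Char)) := [pvLayoutNames, pvVisualNames, pvTextNames]

-- Source B's _category: 'for idx, names in enumerate(_GROUPS): if name in names: return idx' / 'return len(_GROUPS)'
def pvCatLoop (n : List Char) : Nat → List (List (List Char)) → Nat
  | _, [] => 3        -- len(_GROUPS)
  | idx, g :: rest => if g.contains n then idx else pvCatLoop n (idx + 1) rest

def pvCatB (n : List Char) : Nat := pvCatLoop n 0 pvGroupsB

-- one step of Source B's final scan ('if prev is not None and prev != cat: out.append("")')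
def pvStep (st : List (List Char) × Option Nat) (tp : Nat × List Char) :
    List (List Char) × Option Nat :=
  let out := if st.2.isSome && st.2 != some tp.1 then st.1 ++ [([] : List Char)] else st.1
  (out ++ [tp.2], some tp.1)

def format_css_properties_alt (css_text : String) : String :=
  let decorated := (PySem.Chars.splitOn (pvClean css_text.toList) [';']).foldl
      (fun acc raw =>
        if pvOk raw then acc ++ [(pvCatB (pvNameOf (pvPad raw)), pvPad raw)] else acc) []
  let sortedd := PySem.List.sorted decorated (fun t => t.1) false
  let st := sortedd.foldl pvStep ([], none)
  String.mk (PySem.Chars.join ['\n'] st.1)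

-- ===== PRECONDITION & SPEC =====
def Spec_format_css_properties (css_text : String) (out : String) : Prop := out = format_css_properties_alt css_text
instance (css_text : String) (out : String) : Decidable (Spec_format_css_properties css_text out) := by unfold Spec_format_css_properties; infer_instance

-- ===== CLAIM (what is proved, stated in full; the proofs are below) =====
def Claim_equal_format_css_properties : Prop := ∀ (css_text : String), Dom_format_css_properties css_text → Spec_format_css_properties css_text (format_css_properties css_text)

-- ===== LEMMAS AND PROOFS =====

-- A's if/elif category, as a function
def pvCatA (n : List Char) : Nat :=
  if pvLayoutNames.contains n then 0
  else if pvVisualNames.contains n then 1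
  else if pvTextNames.contains n then 2
  else 3

lemma pvCatB_eq (n : List Char) : pvCatB n = pvCatA n := by
  simp [pvCatB, pvGroupsB, pvCatLoop, pvCatA]

lemma pvCatA_le (n : List Char) : pvCatA n ≤ 3 := by
  unfold pvCatA; split_ifs <;> omega

-- A's first loop is filter-then-map; so is B's decorate loop
lemma pvParse_eq {β : Type} (f : List Char → β) (lines : List (List Char)) :
    lines.foldl (fun acc line => if pvOk line then acc ++ [f line] else acc) [] =
      (lines.filter pvOk).map f := by
  simpa using PySem.List.foldl_append_if pvOk f lines []

lemma pvAfold_eq (ps : List (List Char))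
    (a b c d : List (List Char)) :
    ps.foldl
      (fun (g : List (List Char) × List (List Char) × List (List Char) × List (List Char)) prop =>
        if pvLayoutNames.contains (pvNameOf prop) then (g.1 ++ [prop], g.2.1, g.2.2.1, g.2.2.2)
        else if pvVisualNames.contains (pvNameOf prop) then (g.1, g.2.1 ++ [prop], g.2.2.1, g.2.2.2)
        else if pvTextNames.contains (pvNameOf prop) then (g.1, g.2.1, g.2.2.1 ++ [prop], g.2.2.2)
        else (g.1, g.2.1, g.2.2.1, g.2.2.2 ++ [prop]))
      (a, b, c, d) =
    (a ++ ps.filter (fun p => pvCatA (pvNameOf p) == 0),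
     b ++ ps.filter (fun p => pvCatA (pvNameOf p) == 1),
     c ++ ps.filter (fun p => pvCatA (pvNameOf p) == 2),
     d ++ ps.filter (fun p => pvCatA (pvNameOf p) == 3)) := by
  induction ps generalizing a b c d with
  | nil => simp
  | cons p ps ih =>
    simp only [List.foldl_cons]
    by_cases h0 : pvLayoutNames.contains (pvNameOf p) = true
    · have hc : pvCatA (pvNameOf p) = 0 := by
        simp only [pvCatA, if_pos h0]
      rw [if_pos h0, ih]
      simp [hc, List.append_assoc]
    · by_cases h1 : pvVisualNames.contains (pvNameOf p) = true
      · have hc : pvCatA (pvNameOf p) = 1 := by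
          simp only [pvCatA, if_neg h0, if_pos h1]
        rw [if_neg h0, if_pos h1, ih]
        simp [hc, List.append_assoc]
      · by_cases h2 : pvTextNames.contains (pvNameOf p) = true
        · have hc : pvCatA (pvNameOf p) = 2 := by
            simp only [pvCatA, if_neg h0, if_neg h1, if_pos h2]
          rw [if_neg h0, if_neg h1, if_pos h2, ih]
          simp [hc, List.append_assoc]
        · have hc : pvCatA (pvNameOf p) = 3 := by
            simp only [pvCatA, if_neg h0, if_neg h1, if_neg h2]
          rw [if_neg h0, if_neg h1, if_neg h2, ih]
          simp [hc, List.append_assoc]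

-- blocks separated by one blank line
def pvBlocks : List (List (List Char)) → List (List Char)
  | [] => []
  | [g] => g
  | g :: rest => g ++ [] :: pvBlocks rest

lemma pvCascade_eq (q0 q1 q2 q3 : List (List Char)) :
    ((if !q0.isEmpty then
        q0 ++ (if !q1.isEmpty || !q2.isEmpty || !q3.isEmpty then [([] : List Char)] else [])
      else [])
     ++ (if !q1.isEmpty then
           q1 ++ (if !q2.isEmpty || !q3.isEmpty then [([] : List Char)] else [])
         else [])
     ++ (if !q2.isEmpty then
           q2 ++ (if !q3.isEmpty then [([] : List Char)] else [])
         else [])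
     ++ (if !q3.isEmpty then q3 else [])) =
    pvBlocks ([q0, q1, q2, q3].filter (fun x => !x.isEmpty)) := by
  by_cases h0 : q0.isEmpty <;> by_cases h1 : q1.isEmpty <;>
    by_cases h2 : q2.isEmpty <;> by_cases h3 : q3.isEmpty <;>
    simp_all [List.isEmpty_iff, pvBlocks, List.append_assoc]

-- ---- the stable sort sorts a {0,1,2,3}-keyed list into the four filters, in order ----

def pvBefore (a b : Nat × List Char) : Bool := decide (a.1 < b.1)

lemma pvInsert_skip (x : Nat × List Char) (ys zs : List (Nat × List Char))
    (h : ∀ y ∈ ys, pvBefore x y = false) :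
    PySem.List.insertBy pvBefore x (ys ++ zs) = ys ++ PySem.List.insertBy pvBefore x zs := by
  induction ys with
  | nil => simp
  | cons y ys ih =>
    have hy : pvBefore x y = false := h y (by simp)
    simp only [List.cons_append, PySem.List.insertBy, hy, Bool.false_eq_true, if_false]
    rw [ih (fun y hy => h y (by simp [hy]))]

lemma pvInsert_head (x : Nat × List Char) (zs : List (Nat × List Char))
    (h : ∀ z ∈ zs, pvBefore x z = true) :
    PySem.List.insertBy pvBefore x zs = x :: zs := by
  cases zs with
  | nil => rfl
  | cons z zs => simp [PySem.List.insertBy, h z (by simp)]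

def pvFilC (c : Nat) (ps : List (Nat × List Char)) : List (Nat × List Char) :=
  ps.filter (fun t => t.1 == c)

lemma pvInsert_groups (x : Nat × List Char) (q0 q1 q2 q3 : List (Nat × List Char))
    (h0 : ∀ t ∈ q0, t.1 = 0) (h1 : ∀ t ∈ q1, t.1 = 1)
    (h2 : ∀ t ∈ q2, t.1 = 2) (h3 : ∀ t ∈ q3, t.1 = 3)
    (hx : x.1 ≤ 3) :
    PySem.List.insertBy pvBefore x (q0 ++ q1 ++ q2 ++ q3) =
      (if x.1 = 0 then q0 ++ [x] else q0) ++ (if x.1 = 1 then q1 ++ [x] else q1)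
      ++ (if x.1 = 2 then q2 ++ [x] else q2) ++ (if x.1 = 3 then q3 ++ [x] else q3) := by
  interval_cases hc : x.1
  · rw [List.append_assoc, List.append_assoc,
      pvInsert_skip x q0 _ (fun y hy => by simp [pvBefore, h0 y hy, hc]),
      pvInsert_head x _ (fun z hz => by
        rcases List.mem_append.1 hz with hz | hz
        · simp [pvBefore, h1 z hz, hc]
        · rcases List.mem_append.1 hz with hz | hz
          · simp [pvBefore, h2 z hz, hc]
          · simp [pvBefore, h3 z hz, hc])]
    simp [List.append_assoc]
  · rw [List.append_assoc, List.append_assoc,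
      pvInsert_skip x q0 _ (fun y hy => by simp [pvBefore, h0 y hy, hc]),
      pvInsert_skip x q1 _ (fun y hy => by simp [pvBefore, h1 y hy, hc]),
      pvInsert_head x _ (fun z hz => by
        rcases List.mem_append.1 hz with hz | hz
        · simp [pvBefore, h2 z hz, hc]
        · simp [pvBefore, h3 z hz, hc])]
    simp [List.append_assoc]
  · rw [List.append_assoc, List.append_assoc,
      pvInsert_skip x q0 _ (fun y hy => by simp [pvBefore, h0 y hy, hc]),
      pvInsert_skip x q1 _ (fun y hy => by simp [pvBefore, h1 y hy, hc]),
      pvInsert_skip x q2 _ (fun y hy => by simp [pvBefore, h2 y hy, hc]),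
      pvInsert_head x _ (fun z hz => by simp [pvBefore, h3 z hz, hc])]
    simp [List.append_assoc]
  · rw [List.append_assoc, List.append_assoc,
      pvInsert_skip x q0 _ (fun y hy => by simp [pvBefore, h0 y hy, hc]),
      pvInsert_skip x q1 _ (fun y hy => by simp [pvBefore, h1 y hy, hc]),
      pvInsert_skip x q2 _ (fun y hy => by simp [pvBefore, h2 y hy, hc]),
      PySem.List.insertBy_of_forall_not_before pvBefore x q3
        (fun y hy => by simp [pvBefore, h3 y hy, hc])]
    simp [List.append_assoc]

lemma pvSortFold (ps : List (Nat × List Char)) (hps : ∀ t ∈ ps, t.1 ≤ 3) :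
    ∀ (q0 q1 q2 q3 : List (Nat × List Char)),
    (∀ t ∈ q0, t.1 = 0) → (∀ t ∈ q1, t.1 = 1) → (∀ t ∈ q2, t.1 = 2) → (∀ t ∈ q3, t.1 = 3) →
    ps.foldl (fun acc x => PySem.List.insertBy pvBefore x acc) (q0 ++ q1 ++ q2 ++ q3) =
      (q0 ++ pvFilC 0 ps) ++ (q1 ++ pvFilC 1 ps) ++ (q2 ++ pvFilC 2 ps) ++ (q3 ++ pvFilC 3 ps) := by
  induction ps with
  | nil => intro q0 q1 q2 q3 _ _ _ _; simp [pvFilC]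
  | cons x ps ih =>
    intro q0 q1 q2 q3 h0 h1 h2 h3
    have hx : x.1 ≤ 3 := hps x (by simp)
    have hps' : ∀ t ∈ ps, t.1 ≤ 3 := fun t ht => hps t (by simp [ht])
    have hmem : ∀ (c : Nat) (q : List (Nat × List Char)), (∀ t ∈ q, t.1 = c) → x.1 = c →
        ∀ t ∈ (if x.1 = c then q ++ [x] else q), t.1 = c := by
      intro c q hq hxc t ht
      rw [if_pos hxc] at ht
      rcases List.mem_append.1 ht with ht | ht
      · exact hq t ht
      · simp at ht; rw [ht]; exact hxc
    have hmem' : ∀ (c : Nat) (q : List (Nat × List Char)), (∀ t ∈ q, t.1 = c) → x.1 ≠ c →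
        ∀ t ∈ (if x.1 = c then q ++ [x] else q), t.1 = c := by
      intro c q hq hxc t ht
      rw [if_neg hxc] at ht
      exact hq t ht
    simp only [List.foldl_cons]
    rw [pvInsert_groups x q0 q1 q2 q3 h0 h1 h2 h3 hx]
    have hgen : ∀ (c : Nat) (q : List (Nat × List Char)), (∀ t ∈ q, t.1 = c) →
        ∀ t ∈ (if x.1 = c then q ++ [x] else q), t.1 = c := by
      intro c q hq
      by_cases hxc : x.1 = c
      · exact hmem c q hq hxc
      · exact hmem' c q hq hxc
    rw [ih hps' _ _ _ _ (hgen 0 q0 h0) (hgen 1 q1 h1) (hgen 2 q2 h2) (hgen 3 q3 h3)]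
    have hfil : ∀ c : Nat, pvFilC c (x :: ps) =
        (if x.1 = c then [x] else []) ++ pvFilC c ps := by
      intro c; simp only [pvFilC, List.filter_cons]
      by_cases h : x.1 = c <;> simp [h]
    rw [hfil 0, hfil 1, hfil 2, hfil 3]
    interval_cases hc : x.1 <;> simp [List.append_assoc]

lemma pvSorted_eq (ps : List (Nat × List Char)) (hps : ∀ t ∈ ps, t.1 ≤ 3) :
    PySem.List.sorted ps (fun t => t.1) false =
      pvFilC 0 ps ++ pvFilC 1 ps ++ pvFilC 2 ps ++ pvFilC 3 ps := by
  have h : PySem.List.sorted ps (fun t => t.1) false =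
      ps.foldl (fun acc x => PySem.List.insertBy pvBefore x acc)
        (([] : List (Nat × List Char)) ++ [] ++ [] ++ []) := rfl
  rw [h, pvSortFold ps hps [] [] [] [] (by simp) (by simp) (by simp) (by simp)]
  simp

-- ---- the scan over concatenated constant-key groups emits pvBlocks ----

def pvDec (c : Nat) (m : List (List Char)) : List (Nat × List Char) :=
  m.map (fun p => (c, p))

lemma pvScan_some (c : Nat) (m : List (List Char)) :
    ∀ out, (pvDec c m).foldl pvStep (out, some c) = (out ++ m, some c) := by
  induction m with
  | nil => intro out; simp [pvDec]
  | cons p m ih =>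
    intro out
    simp only [pvDec, List.map_cons, List.foldl_cons]
    have hstep : pvStep (out, some c) (c, p) = (out ++ [p], some c) := by
      simp [pvStep]
    rw [hstep]
    simpa [pvDec, List.append_assoc] using ih (out ++ [p])

lemma pvScan_enter (c : Nat) (m : List (List Char)) (hm : m ≠ [])
    (prev : Option Nat) (hp : ∀ c0, prev = some c0 → c0 ≠ c) :
    ∀ out, (pvDec c m).foldl pvStep (out, prev) =
      (out ++ (if prev.isSome then [([] : List Char)] else []) ++ m, some c) := by
  cases m with
  | nil => exact absurd rfl hm
  | cons p m =>
    intro out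
    simp only [pvDec, List.map_cons, List.foldl_cons]
    have hstep : pvStep (out, prev) (c, p) =
        (out ++ (if prev.isSome then [([] : List Char)] else []) ++ [p], some c) := by
      cases prev with
      | none => simp [pvStep]
      | some c0 =>
        have : c0 ≠ c := hp c0 rfl
        simp [pvStep, this]
    rw [hstep]
    simpa [pvDec, List.append_assoc] using
      pvScan_some c m (out ++ (if prev.isSome then [([] : List Char)] else []) ++ [p])

def pvFlat (gs : List (Nat × List (List Char))) : List (Nat × List Char) :=
  gs.flatMap (fun g => pvDec g.1 g.2)

lemma pvScan_chain (gs : List (Nat × List (List Char))) :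
    ∀ (out : List (List Char)) (prev : Option Nat),
    (∀ g ∈ gs, g.2 ≠ []) →
    gs.Pairwise (fun a b => a.1 ≠ b.1) →
    (∀ c0, prev = some c0 → ∀ g ∈ gs, g.1 ≠ c0) →
    ((pvFlat gs).foldl pvStep (out, prev)).1 =
      out ++ (if prev.isSome ∧ gs ≠ [] then [([] : List Char)] else [])
          ++ pvBlocks (gs.map Prod.snd) := by
  induction gs with
  | nil => intro out prev _ _ _; simp [pvFlat, pvBlocks]
  | cons g rest ih =>
    intro out prev hne hpw hprev
    have hg : g.2 ≠ [] := hne g (by simp)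
    have hp : ∀ c0, prev = some c0 → c0 ≠ g.1 := by
      intro c0 h0 h
      exact (hprev c0 h0 g (by simp)) h.symm
    simp only [pvFlat, List.flatMap_cons, List.foldl_append]
    rw [pvScan_enter g.1 g.2 hg prev hp out]
    obtain ⟨hhead, hpw'⟩ := List.pairwise_cons.1 hpw
    have hne' : ∀ g' ∈ rest, g'.2 ≠ [] := fun g' h => hne g' (by simp [h])
    have hprev' : ∀ c0, (some g.1 : Option Nat) = some c0 → ∀ g' ∈ rest, g'.1 ≠ c0 := by
      intro c0 h0 g' hg'
      injection h0 with h0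
      rw [← h0]
      exact fun h => (hhead g' hg') h.symm
    have hrec := ih (out ++ (if prev.isSome then [([] : List Char)] else []) ++ g.2)
      (some g.1) hne' hpw' hprev'
    rw [show pvFlat rest = rest.flatMap (fun g => pvDec g.1 g.2) from rfl] at hrec
    rw [hrec]
    cases rest with
    | nil => simp [pvBlocks]
    | cons b l =>
      have hrb : pvBlocks (g.2 :: b.2 :: l.map Prod.snd) =
          g.2 ++ [] :: pvBlocks (b.2 :: l.map Prod.snd) := rfl
      simp only [List.map_cons, hrb]
      by_cases hps : prev.isSome <;> simp [hps, List.append_assoc]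

lemma pvFlat_filter (m0 m1 m2 m3 : List (List Char)) :
    pvFlat (([(0, m0), (1, m1), (2, m2), (3, m3)]).filter (fun g => !g.2.isEmpty)) =
      pvDec 0 m0 ++ pvDec 1 m1 ++ pvDec 2 m2 ++ pvDec 3 m3 := by
  cases m0 <;> cases m1 <;> cases m2 <;> cases m3 <;>
    simp [pvFlat, pvDec, List.filter, List.append_assoc]

lemma pvMapSnd_filter (m0 m1 m2 m3 : List (List Char)) :
    (([(0, m0), (1, m1), (2, m2), (3, m3)] : List (Nat × List (List Char))).filter
        (fun g => !g.2.isEmpty)).map Prod.snd =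
      ([m0, m1, m2, m3]).filter (fun x => !x.isEmpty) := by
  cases m0 <;> cases m1 <;> cases m2 <;> cases m3 <;> simp [List.filter]

lemma pvScan_all (m0 m1 m2 m3 : List (List Char)) :
    ((pvDec 0 m0 ++ pvDec 1 m1 ++ pvDec 2 m2 ++ pvDec 3 m3).foldl pvStep ([], none)).1 =
      pvBlocks (([m0, m1, m2, m3]).filter (fun x => !x.isEmpty)) := by
  rw [← pvFlat_filter]
  have hpw : (([(0, m0), (1, m1), (2, m2), (3, m3)] : List (Nat × List (List Char)))).Pairwise
      (fun a b => a.1 ≠ b.1) := by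
    norm_num [List.pairwise_cons]
  rw [pvScan_chain _ [] none
    (by intro g hg
        have := List.of_mem_filter hg
        simpa [List.isEmpty_iff] using this)
    (List.Pairwise.sublist List.filter_sublist hpw)
    (by intro c0 h; simp at h)]
  rw [pvMapSnd_filter]
  simp

-- B's decorate map, with pvCatB replaced by A's cascade function
lemma pvMapB_eq (xs : List (List Char)) :
    xs.map (fun raw => (pvCatB (pvNameOf (pvPad raw)), pvPad raw)) =
      xs.map (fun raw => (pvCatA (pvNameOf (pvPad raw)), pvPad raw)) := by
  simp [pvCatB_eq]

-- the c-filter of the decorated list, as a decorated filter of the lines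
lemma pvFilC_map (k : List Char → Nat) (xs : List (List Char)) (c : Nat) :
    pvFilC c (xs.map (fun raw => (k raw, pvPad raw))) =
      pvDec c ((xs.filter (fun raw => k raw == c)).map pvPad) := by
  induction xs with
  | nil => simp [pvFilC, pvDec]
  | cons x xs ih =>
    by_cases h : k x = c
    · have h1 : pvFilC c ((x :: xs).map (fun raw => (k raw, pvPad raw))) =
          (k x, pvPad x) :: pvFilC c (xs.map (fun raw => (k raw, pvPad raw))) := by
        simp [pvFilC, h]
      have h2 : (x :: xs).filter (fun raw => k raw == c) =
          x :: xs.filter (fun raw => k raw == c) := by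
        simp [h]
      rw [h1, h2, ih]
      simp [pvDec, h]
    · have h1 : pvFilC c ((x :: xs).map (fun raw => (k raw, pvPad raw))) =
          pvFilC c (xs.map (fun raw => (k raw, pvPad raw))) := by
        simp [pvFilC, h]
      have h2 : (x :: xs).filter (fun raw => k raw == c) =
          xs.filter (fun raw => k raw == c) := by
        simp [h]
      rw [h1, h2, ih]

-- B's decorate keys are ≤ 3
lemma pvDecorated_keys (xs : List (List Char)) :
    ∀ t ∈ xs.map (fun raw => (pvCatA (pvNameOf (pvPad raw)), pvPad raw)), t.1 ≤ 3 := by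
  intro t ht
  simp only [List.mem_map] at ht
  obtain ⟨raw, _, rfl⟩ := ht
  exact pvCatA_le (pvNameOf (pvPad raw))

-- ===== VERDICT (by name: the statement is the Claim_ definition above) =====
theorem format_css_properties_spec : Claim_equal_format_css_properties := by
  intro css_text _
  unfold Spec_format_css_properties format_css_properties format_css_properties_alt
  simp only [pvParse_eq, pvAfold_eq, List.nil_append, pvMapB_eq]
  rw [pvSorted_eq _ (pvDecorated_keys _),
    pvFilC_map, pvFilC_map, pvFilC_map, pvFilC_map, pvScan_all, pvCascade_eq]
  have hq : ∀ c : Nat,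
      (((PySem.Chars.splitOn (pvClean css_text.toList) [';']).filter pvOk).filter
          (fun raw => pvCatA (pvNameOf (pvPad raw)) == c)).map pvPad =
        (((PySem.Chars.splitOn (pvClean css_text.toList) [';']).filter pvOk).map pvPad).filter
          (fun p => pvCatA (pvNameOf p) == c) := by
    intro c
    rw [List.filter_map]
    rfl
  rw [hq 0, hq 1, hq 2, hq 3]
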